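-- pv_equiv track=rewrite | github.com/blademaw/pysweeper | minetest.py | getOthers
-- ===== SOURCE A (Python) =====
-- def getOthers(a, b, board):
--     oA, oB = a, b
--     a, b = a-1, b-1
--     res, coords = [], []
--     for loc in range(9):
--         if not(a < 0 or b < 0):
--             try:
--                 if not(a == oA and b == oB):
--                     res += [board[a][b]]
--                     coords += [(a, b)]
--             except IndexError:
--                 pass
--         b += 1
--         if (loc+1) % 3 == 0:
--             a, b = a + 1, b - 3
--
--     return res, coords
-- ===== SOURCE B (Python) =====
-- def getOthers(a, b, board):
--     r0, r1 = max(a - 1, 0), max(a + 2, 0)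
--     c0, c1 = max(b - 1, 0), max(b + 2, 0)
--     res, coords = [], []
--     for i, row in enumerate(board[r0:r1], start=r0):
--         for j, v in enumerate(row[c0:c1], start=c0):
--             if (i, j) != (a, b):
--                 res.append(v)
--                 coords.append((i, j))
--     return res, coords
-- ===== Notes on version B (the rewrite author's own statement) =====
-- stated objective: simpler
-- what changed: Replaces the flat range(9) loop with mutable cursors, modulo row wrap and try/except IndexError by slicing: board[max(a-1,0):a+2] and row[max(b-1,0):b+2] clip the 3x3 block to the grid, so both out-of-range directions vanish (slices clamp) and only the centre cell is filtered while enumerate(..., start=...) recovers the coordinates.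
import Mathlib
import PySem

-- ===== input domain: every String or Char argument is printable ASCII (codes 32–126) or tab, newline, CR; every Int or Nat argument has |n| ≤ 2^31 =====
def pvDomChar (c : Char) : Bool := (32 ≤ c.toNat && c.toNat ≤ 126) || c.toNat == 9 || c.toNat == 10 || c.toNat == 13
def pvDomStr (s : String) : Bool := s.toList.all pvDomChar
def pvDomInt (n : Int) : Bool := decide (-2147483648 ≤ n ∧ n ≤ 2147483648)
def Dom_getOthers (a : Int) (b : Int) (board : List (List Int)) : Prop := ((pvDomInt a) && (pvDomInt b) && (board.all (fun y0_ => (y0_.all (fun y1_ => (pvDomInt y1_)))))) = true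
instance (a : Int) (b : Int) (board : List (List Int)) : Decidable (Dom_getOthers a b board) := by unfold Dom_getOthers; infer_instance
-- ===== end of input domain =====

-- B replaces A's flat range(9) loop (mutable cursors, modulo row wrap, try/except IndexError)
-- by slicing the 3x3 block out of the grid (slices clamp at the edges) and enumerating it
-- with its true coordinates, filtering only the centre cell: simpler, same values.

-- ===== PORT A =====
-- one iteration of A's 'for loc in range(9)' loop body over the state (a, b, res, coords)
def pvStepA (oA oB : Int) (board : List (List Int)) (st : Int × Int × List Int × List (Int × Int)) (loc : Int) : Int × Int × List Int × List (Int × Int) :=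
  let a := st.1
  let b := st.2.1
  let res := st.2.2.1
  let coords := st.2.2.2
  let rc : List Int × List (Int × Int) :=
    if a < 0 ∨ b < 0 then (res, coords)
    else if a = oA ∧ b = oB then (res, coords)
    else
      -- board[a][b]: an IndexError (none) is swallowed by the except-clause
      match (PySem.List.pyGet? board a).bind (fun row => PySem.List.pyGet? row b) with
      | some v => (res ++ [v], coords ++ [(a, b)])
      | none => (res, coords)
  let b' := b + 1
  if (loc + 1) % 3 = 0 then (a + 1, b' - 3, rc) else (a, b', rc)

def getOthers (a : Int) (b : Int) (board : List (List Int)) : List Int × (List (Int × Int)) :=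
  let s := (PySem.List.pyRange 0 9 1).foldl (pvStepA a b board) (a - 1, b - 1, [], [])
  (s.2.2.1, s.2.2.2)

-- ===== PORT B =====
-- for i, row in enumerate(board[r0:r1], start=r0): for j, v in enumerate(row[c0:c1], start=c0): …
def getOthers_alt (a : Int) (b : Int) (board : List (List Int)) : List Int × (List (Int × Int)) :=
  let r0 := max (a - 1) 0
  let r1 := max (a + 2) 0
  let c0 := max (b - 1) 0
  let c1 := max (b + 2) 0
  (PySem.List.enumerate (PySem.List.slice board (some r0) (some r1)) r0).foldl
    (fun acc irow =>
      (PySem.List.enumerate (PySem.List.slice irow.2 (some c0) (some c1)) c0).foldl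
        (fun acc2 jv =>
          if ¬(irow.1 = a ∧ jv.1 = b) then (acc2.1 ++ [jv.2], acc2.2 ++ [(irow.1, jv.1)])
          else acc2)
        acc)
    ([], [])

-- ===== PRECONDITION & SPEC =====
def Spec_getOthers (a : Int) (b : Int) (board : List (List Int)) (out : List Int × (List (Int × Int))) : Prop := out = getOthers_alt a b board
instance (a : Int) (b : Int) (board : List (List Int)) (out : List Int × (List (Int × Int))) : Decidable (Spec_getOthers a b board out) := by unfold Spec_getOthers; infer_instance

-- ===== CLAIM (what is proved, stated in full; the proofs are below) =====
def Claim_equal_getOthers : Prop := ∀ (a : Int) (b : Int) (board : List (List Int)), Dom_getOthers a b board → Spec_getOthers a b board (getOthers a b board)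

-- ===== LEMMAS AND PROOFS =====

-- the common canonical form both ports are reduced to:
-- the cell at (i, j) if it is in bounds and not the centre
def pvOptCell (a b : Int) (row : List Int) (i j : Int) : Option (Int × (Int × Int)) :=
  if 0 ≤ j ∧ ¬(i = a ∧ j = b) then (row[j.toNat]?).map (fun v => (v, (i, j))) else none

def pvRowCanon (a b i : Int) (row : List Int) : List (Int × (Int × Int)) :=
  ([b - 1, b, b + 1]).filterMap (pvOptCell a b row i)

-- row i of the board, guarded at negative indices (no Python wraparound here)
def pvRO (board : List (List Int)) (i : Int) : Option (List Int) :=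
  if 0 ≤ i then board[i.toNat]? else none

def pvCanon (a b : Int) (board : List (List Int)) : List (Int × (Int × Int)) :=
  (([a - 1, a, a + 1]).filterMap (fun i => (pvRO board i).map (fun r => (i, r)))).flatMap
    (fun ir => pvRowCanon a b ir.1 ir.2)

-- ---- A side ----
-- board[i][j] guarded by 0 ≤ i, 0 ≤ j, with IndexError as none, filtered at the centre
def pvC (oA oB : Int) (board : List (List Int)) (na nb : Int) : Option Int :=
  if na = oA ∧ nb = oB then none
  else if 0 ≤ na ∧ 0 ≤ nb then (PySem.List.pyGet? board na).bind (fun r => PySem.List.pyGet? r nb)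
  else none

-- the (res, coords) contribution of one visit of A's loop at cell (na, nb)
def pvPairC (oA oB : Int) (board : List (List Int)) (na nb : Int) : List Int × List (Int × Int) :=
  match pvC oA oB board na nb with
  | some v => ([v], [(na, nb)])
  | none => ([], [])

lemma stepA_eq (oA oB : Int) (board : List (List Int)) (a b : Int) (res : List Int) (coords : List (Int × Int)) (loc : Int) :
    pvStepA oA oB board (a, b, res, coords) loc =
      (if (loc + 1) % 3 = 0 then a + 1 else a,
       if (loc + 1) % 3 = 0 then b + 1 - 3 else b + 1,
       res ++ (pvPairC oA oB board a b).1,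
       coords ++ (pvPairC oA oB board a b).2) := by
  simp only [pvStepA, pvPairC, pvC]
  by_cases h1 : a < 0 ∨ b < 0
  · have h1' : ¬ (0 ≤ a ∧ 0 ≤ b) := by omega
    by_cases h2 : a = oA ∧ b = oB
    · simp [h1, h2]; split_ifs <;> simp
    · simp [h1, h2, h1']; split_ifs <;> simp
  · have h1' : (0 ≤ a ∧ 0 ≤ b) := by omega
    by_cases h2 : a = oA ∧ b = oB
    · simp [h1, h1', h2]; split_ifs <;> simp
    · simp only [if_neg h1, if_pos h1', if_neg h2]
      rcases hv : (PySem.List.pyGet? board a).bind (fun row => PySem.List.pyGet? row b) with _ | v <;>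
        (simp [hv]; split_ifs <;> simp)

-- one cell of A against the canonical cell, inside an existing row
lemma cellA_eq (a b : Int) (board : List (List Int)) (i j : Int) (row : List Int)
    (hi : 0 ≤ i) (hr : board[i.toNat]? = some row) :
    pvPairC a b board i j = (pvOptCell a b row i j).elim ([], []) (fun c => ([c.1], [c.2])) := by
  simp only [pvPairC, pvC, pvOptCell]
  have hget : PySem.List.pyGet? board i = some row := by
    rw [PySem.List.pyGet?_of_nonneg board hi]; exact hr
  by_cases hc : i = a ∧ j = b
  · simp [hc]
  · by_cases hj : 0 ≤ j
    · simp only [if_neg hc, if_pos (⟨hi, hj⟩ : 0 ≤ i ∧ 0 ≤ j), if_pos (⟨hj, hc⟩ : 0 ≤ j ∧ ¬(i = a ∧ j = b)), hget, Option.bind_some]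
      rw [PySem.List.pyGet?_of_nonneg row hj]
      rcases hv : row[j.toNat]? with _ | v <;> simp
    · have : ¬ (0 ≤ i ∧ 0 ≤ j) := by omega
      have : ¬ (0 ≤ j ∧ ¬(i = a ∧ j = b)) := by omega
      simp [hc, hj, *]
  
-- the three cells of row i of A, against the canonical row
lemma rowA_eq (a b : Int) (board : List (List Int)) (i : Int) :
    ((pvPairC a b board i (b - 1)).1 ++ (pvPairC a b board i b).1 ++ (pvPairC a b board i (b + 1)).1,
     (pvPairC a b board i (b - 1)).2 ++ (pvPairC a b board i b).2 ++ (pvPairC a b board i (b + 1)).2)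
    = (((pvRO board i).elim [] (pvRowCanon a b i)).map (fun c => c.1),
       ((pvRO board i).elim [] (pvRowCanon a b i)).map (fun c => c.2)) := by
  by_cases hi : 0 ≤ i
  · rcases hr : board[i.toNat]? with _ | row
    · have hget : PySem.List.pyGet? board i = none := by
        rw [PySem.List.pyGet?_of_nonneg board hi]; exact hr
      have hp : ∀ j, pvPairC a b board i j = ([], []) := by
        intro j
        simp only [pvPairC, pvC, hget]
        split_ifs <;> simp
      simp [pvRO, hi, hr, hp]
    · rw [cellA_eq a b board i (b-1) row hi hr, cellA_eq a b board i b row hi hr,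
         cellA_eq a b board i (b+1) row hi hr]
      simp only [pvRO, if_pos hi, hr, Option.elim_some, pvRowCanon, List.filterMap_cons, List.filterMap_nil]
      rcases pvOptCell a b row i (b-1) with _ | c1 <;>
      rcases pvOptCell a b row i b with _ | c2 <;>
      rcases pvOptCell a b row i (b+1) with _ | c3 <;> simp
  · have hp : ∀ j, pvPairC a b board i j = ([], []) := by
      intro j
      simp only [pvPairC, pvC]
      have : ¬ (0 ≤ i ∧ 0 ≤ j) := by omega
      split_ifs <;> simp_all
    simp [pvRO, hi, hp]

-- A equals the canonical cell list
lemma A_eq_canon (a b : Int) (board : List (List Int)) :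
    getOthers a b board = ((pvCanon a b board).map (fun c => c.1), (pvCanon a b board).map (fun c => c.2)) := by
  have hr : PySem.List.pyRange 0 9 1 = [0,1,2,3,4,5,6,7,8] := by decide
  simp only [getOthers, hr, List.foldl_cons, List.foldl_nil, stepA_eq]
  norm_num
  have e1 : b + 1 + 1 - 3 = b - 1 := by ring
  have e4 : b + 1 + 1 - 3 + 1 + 1 + 1 - 3 = b - 1 := by ring
  simp only [e1, e4]
  have f1 : b - 1 + 1 = b := by ring
  simp only [f1]
  have hc : pvPairC a b board a b = ([], []) := by simp [pvPairC, pvC]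
  simp only [hc, List.append_nil]
  have h1 := rowA_eq a b board (a - 1)
  have h2 := rowA_eq a b board a
  have h3 := rowA_eq a b board (a + 1)
  simp only [Prod.mk.injEq] at h1 h2 h3
  simp only [pvCanon, List.filterMap_cons, List.filterMap_nil]
  rcases hA : pvRO board (a-1) with _ | rA <;>
  rcases hB : pvRO board a with _ | rB <;>
  rcases hC : pvRO board (a+1) with _ | rC <;>
    simp_all [← List.append_assoc]

-- ---- B side ----
-- enumerating a drop/take window pairs each element with its true index in L
lemma enum_take_drop {α : Type} (L : List α) (k : Nat) : ∀ (n : Nat),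
    PySem.List.enumerate ((L.drop n).take k) (n : Int)
      = (PySem.List.pyRange (n : Int) ((n + k : Nat) : Int) 1).filterMap
          (fun i => (L[i.toNat]?).map (fun v => (i, v))) := by
  induction k with
  | zero =>
    intro n
    simp [PySem.List.pyRange_one_eq_nil]
  | succ k ih =>
    intro n
    rcases hd : L.drop n with _ | ⟨p, tl⟩
    · have hlen : L.length ≤ n := List.drop_eq_nil_iff.mp hd
      rw [List.filterMap_eq_nil_iff.mpr ?_]
      · simp [hd]
      · intro i hi
        have hmem := (PySem.List.mem_pyRange_one).mp hi
        have : L.length ≤ i.toNat := by omega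
        simp [List.getElem?_eq_none this]
    · have htl : L.drop (n + 1) = tl := by
        rw [List.drop_add_one_eq_tail_drop, hd]
        rfl
      have hp : L[n]? = some p := by
        have h0 : (L.drop n)[0]? = L[n + 0]? := List.getElem?_drop
        rw [hd] at h0
        simpa using h0.symm
      simp only [List.take_succ_cons, PySem.List.enumerate_cons]
      rw [show tl.take k = (L.drop (n + 1)).take k from by rw [htl]]
      have hcast : (n : Int) + 1 = ((n + 1 : Nat) : Int) := by push_cast; ring
      rw [hcast, ih (n + 1)]
      conv_rhs => rw [PySem.List.pyRange_one_cons (show (n:Int) < ((n + (k+1) : Nat) : Int) by push_cast; omega)]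
      simp only [List.filterMap_cons, Int.toNat_natCast, hp]
      push_cast
      ring_nf
      simp

-- the sliced-and-enumerated window equals a filterMap over the three candidate indices
lemma key_slice_enum {α : Type} (L : List α) (x : Int) :
    PySem.List.enumerate (PySem.List.slice L (some (max (x - 1) 0)) (some (max (x + 2) 0))) (max (x - 1) 0)
      = ([x - 1, x, x + 1]).filterMap
          (fun i => if 0 ≤ i then (L[i.toNat]?).map (fun v => (i, v)) else none) := by
  by_cases hx1 : 1 ≤ x
  · have hm0 : max (x - 1) 0 = x - 1 := by omega
    have hm1 : max (x + 2) 0 = x + 2 := by omega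
    rw [hm0, hm1, PySem.List.slice_toNat L (by omega) (by omega)]
    have hk : (x + 2).toNat - (x - 1).toNat = 3 := by omega
    have hs : (x - 1) = (((x - 1).toNat : Nat) : Int) := by omega
    rw [hk, hs]
    simp only [Int.toNat_natCast]
    rw [enum_take_drop]
    rw [PySem.List.pyRange_one_cons (by push_cast; omega),
        PySem.List.pyRange_one_cons (by push_cast; omega),
        PySem.List.pyRange_one_cons (by push_cast; omega),
        PySem.List.pyRange_one_eq_nil (by push_cast; omega)]
    have g0 : (((x - 1).toNat : Nat) : Int) = x - 1 := by omega
    simp only [g0]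
    have g1 : x - 1 + 1 = x := by ring
    simp only [g1]
    simp only [List.filterMap_cons, List.filterMap_nil]
    rw [if_pos (show (0:Int) ≤ x - 1 by omega), if_pos (show (0:Int) ≤ x by omega),
        if_pos (show (0:Int) ≤ x + 1 by omega)]
  · by_cases hx0 : x = 0
    · subst hx0
      norm_num
      rw [PySem.List.slice_to L (by omega)]
      have H := enum_take_drop L 2 0
      push_cast at H
      norm_num at H ⊢
      rw [show (2:Int).toNat = 2 from rfl]
      rw [H]
      rw [show PySem.List.pyRange 0 2 1 = [0, 1] from by decide]
      simp [List.filterMap_cons]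
    · by_cases hxm1 : x = -1
      · subst hxm1
        norm_num
        rw [PySem.List.slice_to L (by omega)]
        have H := enum_take_drop L 1 0
        push_cast at H
        norm_num at H ⊢
        rw [H]
        rw [show PySem.List.pyRange 0 1 1 = [0] from by decide]
        simp [List.filterMap_cons]
      · have hm0 : max (x - 1) 0 = 0 := by omega
        have hm1 : max (x + 2) 0 = 0 := by omega
        rw [hm0, hm1, PySem.List.slice_toNat L (by omega) (by omega)]
        have h1 : ¬ (0:Int) ≤ x - 1 := by omega
        have h2 : ¬ (0:Int) ≤ x := by omega
        have h3 : ¬ (0:Int) ≤ x + 1 := by omega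
        simp [h1, h2, h3]
        omega

-- a loop appending lists to both components is two flatMaps
lemma foldl_append_pair {α β γ : Type} (l : List α) (g1 : α → List β) (g2 : α → List γ) (acc : List β × List γ) :
    l.foldl (fun acc x => (acc.1 ++ g1 x, acc.2 ++ g2 x)) acc
      = (acc.1 ++ l.flatMap g1, acc.2 ++ l.flatMap g2) := by
  induction l generalizing acc with
  | nil => simp
  | cons y t ih => simp [ih]

-- pvRO in the shape key_slice_enum produces
lemma pvRO_map (board : List (List Int)) (i : Int) :
    (pvRO board i).map (fun r => (i, r)) = if 0 ≤ i then (board[i.toNat]?).map (fun v => (i, v)) else none := by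
  by_cases hi : 0 ≤ i <;> simp [pvRO, hi]

-- B's inner loop: append-through-a-test is filter-then-map, in both components
lemma innerB (a b i : Int) (l : List (Int × Int)) (acc : List Int × List (Int × Int)) :
    l.foldl (fun acc2 jv => if ¬(i = a ∧ jv.1 = b) then (acc2.1 ++ [jv.2], acc2.2 ++ [(i, jv.1)]) else acc2) acc
    = (acc.1 ++ (l.filter (fun jv => decide (¬(i = a ∧ jv.1 = b)))).map (fun jv => jv.2),
       acc.2 ++ (l.filter (fun jv => decide (¬(i = a ∧ jv.1 = b)))).map (fun jv => (i, jv.1))) := by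
  induction l generalizing acc with
  | nil => simp
  | cons y t ih =>
    rw [List.foldl_cons]
    by_cases h : i = a ∧ y.1 = b
    · rw [if_neg (not_not_intro h), ih]
      simp [h]
    · rw [if_pos h, ih]
      have hb : (!decide (i = a) || !decide (y.1 = b)) = true := by
        rcases Decidable.not_and_iff_or_not.mp h with h' | h' <;> simp [h']
      simp [List.filter_cons, hb, List.append_assoc]

-- one candidate column of B against the canonical cell
lemma cellB_fst (a b i j : Int) (row : List Int) :
    ((if 0 ≤ j then (row[j.toNat]?).map (fun v => (j, v)) else none).filter
       (fun jv => decide (¬(i = a ∧ jv.1 = b)))).map (fun jv => jv.2)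
    = (pvOptCell a b row i j).map (fun c => c.1) := by
  by_cases hj : 0 ≤ j
  · by_cases hc : i = a ∧ j = b
    · obtain ⟨hc1, hc2⟩ := hc
      subst hc1
      subst hc2
      cases hv : row[j.toNat]? <;> simp [pvOptCell, hj, hv, Option.filter]
    · cases hv : row[j.toNat]? <;> simp [pvOptCell, hj, hc, hv, Option.filter]
  · simp [pvOptCell, hj]

lemma cellB_snd (a b i j : Int) (row : List Int) :
    ((if 0 ≤ j then (row[j.toNat]?).map (fun v => (j, v)) else none).filter
       (fun jv => decide (¬(i = a ∧ jv.1 = b)))).map (fun jv => (i, jv.1))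
    = (pvOptCell a b row i j).map (fun c => c.2) := by
  by_cases hj : 0 ≤ j
  · by_cases hc : i = a ∧ j = b
    · obtain ⟨hc1, hc2⟩ := hc
      subst hc1
      subst hc2
      cases hv : row[j.toNat]? <;> simp [pvOptCell, hj, hv, Option.filter]
    · cases hv : row[j.toNat]? <;> simp [pvOptCell, hj, hc, hv, Option.filter]
  · simp [pvOptCell, hj]

-- B equals the canonical cell list
lemma B_eq_canon (a b : Int) (board : List (List Int)) :
    getOthers_alt a b board = ((pvCanon a b board).map (fun c => c.1), (pvCanon a b board).map (fun c => c.2)) := by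
  simp only [getOthers_alt]
  rw [key_slice_enum board a]
  simp only [key_slice_enum]
  simp only [innerB]
  rw [foldl_append_pair]
  simp only [List.nil_append, pvCanon, pvRO_map, List.map_flatMap]
  refine congrArg₂ Prod.mk ?_ ?_
  · refine List.flatMap_congr (fun ir _ => ?_)
    rw [List.filter_filterMap, List.map_filterMap, pvRowCanon, List.map_filterMap]
    exact List.filterMap_congr (fun j _ => cellB_fst a b ir.1 j ir.2)
  · refine List.flatMap_congr (fun ir _ => ?_)
    rw [List.filter_filterMap, List.map_filterMap, pvRowCanon, List.map_filterMap]
    exact List.filterMap_congr (fun j _ => cellB_snd a b ir.1 j ir.2)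

-- ===== VERDICT (by name: the statement is the Claim_ definition above) =====
theorem getOthers_spec : Claim_equal_getOthers := by
  intro a b board _
  unfold Spec_getOthers
  rw [A_eq_canon, B_eq_canon]
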